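-- pv_equiv track=rewrite | github.com/informatics-isi-edu/imagetools | imagetools/batch_id.py | urlb32_encode
-- ===== SOURCE A (Python) =====
-- _b32_symbols = list('0123456789abcdefghjkmnpqrstvwxyz')
--
-- def urlb32_encode(i, zeropad=0):
--     if not isinstance(i, int):
--         raise TypeError('first input must be integer type')
--     output = []
--     while i > 0:
--         digit = i % 32
--         i = i // 32
--         output.append(_b32_symbols[digit])
--     if zeropad > len(output):
--         output.extend([ '0' for i in range(zeropad - len(output)) ])
--     output2 = []
--     for idx in range(len(output)):
--         if idx > 0 and idx % 3 == 0:
--             output2.append('-')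
--         output2.append(output[idx])
--     output2.reverse()
--     return ''.join(output2)
-- ===== SOURCE B (Python) =====
-- _b32_symbols = '0123456789abcdefghjkmnpqrstvwxyz'
--
-- def urlb32_encode(i, zeropad=0):
--     if not isinstance(i, int):
--         raise TypeError('first input must be integer type')
--     digits = []
--     while i > 0:
--         digits.append(_b32_symbols[i % 32])
--         i //= 32
--     if zeropad > len(digits):
--         digits.extend('0' * (zeropad - len(digits)))
--     # group the LSB-first digit list into chunks of 3 (i.e. chunks of 3 counting
--     # from the right of the final string), join with '-', then reverse into MSB order
--     chunks = [''.join(digits[j:j+3]) for j in range(0, len(digits), 3)]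
--     return '-'.join(chunks)[::-1]
-- ===== Notes on version B (the rewrite author's own statement) =====
-- stated objective: simpler
-- what changed: B replaces A's index-driven loop that interleaves '-' separators while copying digits by a direct decomposition: chunk the LSB-first digit list into groups of 3, join the groups with '-', and reverse once.
import Mathlib
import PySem

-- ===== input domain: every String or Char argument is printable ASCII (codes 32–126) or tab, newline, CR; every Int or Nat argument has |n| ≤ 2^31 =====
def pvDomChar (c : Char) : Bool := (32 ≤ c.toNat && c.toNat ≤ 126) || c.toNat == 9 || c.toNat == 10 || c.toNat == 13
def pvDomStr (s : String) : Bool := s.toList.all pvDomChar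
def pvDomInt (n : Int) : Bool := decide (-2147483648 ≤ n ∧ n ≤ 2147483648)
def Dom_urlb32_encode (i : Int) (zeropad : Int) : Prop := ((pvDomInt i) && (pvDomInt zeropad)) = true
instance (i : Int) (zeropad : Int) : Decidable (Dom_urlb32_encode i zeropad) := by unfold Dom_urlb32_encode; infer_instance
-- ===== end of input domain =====

-- B replaces A's index-interleaved separator loop by a chunk-of-3-and-join pass (simpler decomposition; same cost).

def pvSyms : List Char := "0123456789abcdefghjkmnpqrstvwxyz".toList

-- ===== PORT A =====
-- while i > 0: output.append(_b32_symbols[i % 32]); i //= 32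
def pvLoopA (i : Int) (output : List Char) : List Char :=
  if 0 < i then
    pvLoopA (PySem.Int.floordiv i 32) (output ++ [pvSyms.getD (PySem.Int.mod i 32).toNat '?'])
  else output
termination_by i.toNat
decreasing_by
  have h32 : (0:Int) < 32 := by norm_num
  rw [PySem.Int.floordiv_eq_ediv_of_pos h32]
  omega

def urlb32_encode (i : Int) (zeropad : Int) : String :=
  let output := pvLoopA i []
  let output := if zeropad > (output.length : Int)
    then output ++ (List.range (zeropad - output.length).toNat).map (fun _ => '0')
    else output
  let output2 := (PySem.List.enumerate output 0).foldl
    (fun acc p =>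
      (if 0 < p.1 ∧ PySem.Int.mod p.1 3 = 0 then acc ++ ['-'] else acc) ++ [p.2]) []
  String.ofList output2.reverse

-- ===== PORT B =====
def pvLoopB (i : Int) (digits : List Char) : List Char :=
  if 0 < i then
    pvLoopB (PySem.Int.floordiv i 32) (digits ++ [pvSyms.getD (PySem.Int.mod i 32).toNat '?'])
  else digits
termination_by i.toNat
decreasing_by
  have h32 : (0:Int) < 32 := by norm_num
  rw [PySem.Int.floordiv_eq_ediv_of_pos h32]
  omega

-- [digits[j:j+3] for j in range(0, len(digits), 3)]
def pvChunk3 (l : List Char) : List (List Char) :=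
  if l = [] then [] else l.take 3 :: pvChunk3 (l.drop 3)
termination_by l.length
decreasing_by simp_all [List.length_drop]; cases l <;> simp_all

def urlb32_encode_alt (i : Int) (zeropad : Int) : String :=
  let digits := pvLoopB i []
  let digits := if zeropad > (digits.length : Int)
    then digits ++ List.replicate (zeropad - digits.length).toNat '0'
    else digits
  String.ofList (List.intercalate ['-'] (pvChunk3 digits)).reverse

-- ===== PRECONDITION & SPEC =====
def Spec_urlb32_encode (i : Int) (zeropad : Int) (out : String) : Prop := out = urlb32_encode_alt i zeropad
instance (i : Int) (zeropad : Int) (out : String) : Decidable (Spec_urlb32_encode i zeropad out) := by unfold Spec_urlb32_encode; infer_instance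

-- ===== CLAIM (what is proved, stated in full; the proofs are below) =====
def Claim_equal_urlb32_encode : Prop := ∀ (i : Int) (zeropad : Int), Dom_urlb32_encode i zeropad → Spec_urlb32_encode i zeropad (urlb32_encode i zeropad)

-- ===== LEMMAS AND PROOFS =====

theorem pvLoop_eq (i : Int) (acc : List Char) : pvLoopA i acc = pvLoopB i acc := by
  induction i, acc using pvLoopA.induct with
  | case1 i acc h ih => rw [pvLoopA, pvLoopB, if_pos h, if_pos h]; exact ih
  | case2 i acc h => rw [pvLoopA, pvLoopB, if_neg h, if_neg h]

-- A's separator loop, characterised structurally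
def pvIns (k : Nat) : List Char → List Char
  | [] => []
  | c :: t => (if 0 < k ∧ k % 3 = 0 then ['-'] else []) ++ c :: pvIns (k + 1) t

theorem pvFold_eq (l : List Char) : ∀ (k : Nat) (acc : List Char),
    (PySem.List.enumerate l (k : Int)).foldl
      (fun acc p => (if 0 < p.1 ∧ PySem.Int.mod p.1 3 = 0 then acc ++ ['-'] else acc) ++ [p.2]) acc
    = acc ++ pvIns k l := by
  induction l with
  | nil => intro k acc; simp [PySem.List.enumerate_nil, pvIns]
  | cons c t ih =>
    intro k acc
    rw [PySem.List.enumerate_cons]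
    simp only [List.foldl_cons]
    have hmod : PySem.Int.mod (k : Int) 3 = ((k % 3 : Nat) : Int) := PySem.Int.mod_natCast k 3
    have : ((k : Int) + 1) = ((k + 1 : Nat) : Int) := by push_cast; ring
    rw [this, ih]
    have hcond : ((0 : Int) < (k : Int) ∧ PySem.Int.mod (k : Int) 3 = 0) = (0 < k ∧ k % 3 = 0) := by
      rw [hmod]; apply propext; constructor <;> intro h <;> [omega; exact ⟨by exact_mod_cast h.1, by exact_mod_cast h.2⟩]
    simp only [hcond, pvIns]
    by_cases hk : 0 < k ∧ k % 3 = 0 <;> simp [hk]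

theorem pvIns_shift (t : List Char) : ∀ k : Nat, 0 < k → pvIns k t = pvIns (k + 3) t := by
  induction t with
  | nil => intro k _; simp [pvIns]
  | cons c t ih =>
    intro k hk
    simp only [pvIns]
    rw [ih (k + 1) (by omega)]
    have h1 : (0 < k ∧ k % 3 = 0) = (0 < k + 3 ∧ (k + 3) % 3 = 0) := by
      apply propext; constructor <;> intro h <;> omega
    have h2 : k + 1 + 3 = k + 3 + 1 := by omega
    simp only [h1, h2]

theorem pvInter_cons (s x y : List Char) (zs : List (List Char)) :
    List.intercalate s (x :: y :: zs) = x ++ s ++ List.intercalate s (y :: zs) := by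
  simp [List.intercalate, List.intersperse]

theorem pvIns_chunk (l : List Char) : pvIns 0 l = List.intercalate ['-'] (pvChunk3 l) := by
  induction l using pvChunk3.induct with
  | case1 => simp [pvIns, pvChunk3, List.intercalate]
  | case2 l hne ih =>
    match l, hne with
    | [c], _ => simp [pvIns, pvChunk3, List.intercalate]
    | [c, d], _ => simp [pvIns, pvChunk3, List.intercalate]
    | c :: d :: e :: t, _ =>
      rw [pvChunk3]
      simp only [if_neg (by simp : ¬ (c :: d :: e :: t = []))]
      simp only [List.take, List.drop] at *
      cases t with
      | nil => simp [pvIns, pvChunk3, List.intercalate]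
      | cons f t' =>
        have h3 : pvIns 0 (c :: d :: e :: f :: t') = c :: d :: e :: '-' :: pvIns 0 (f :: t') := by
          simp [pvIns, ← pvIns_shift (t') 1]
        rw [h3, ih]
        have hcne : pvChunk3 (f :: t') ≠ [] := by rw [pvChunk3]; simp
        cases hch : pvChunk3 (f :: t') with
        | nil => exact absurd hch hcne
        | cons x xs => simp [pvInter_cons]

theorem pvFold_eq0 (l : List Char) :
    (PySem.List.enumerate l 0).foldl
      (fun acc p => (if 0 < p.1 ∧ PySem.Int.mod p.1 3 = 0 then acc ++ ['-'] else acc) ++ [p.2]) []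
    = pvIns 0 l := by
  have h := pvFold_eq l 0 []
  simpa using h

theorem urlb32_encode_spec : Claim_equal_urlb32_encode := by
  intro i zeropad _
  unfold Spec_urlb32_encode urlb32_encode urlb32_encode_alt
  rw [pvLoop_eq]
  have hpad : ((List.range (zeropad - (pvLoopB i []).length).toNat).map (fun _ => '0'))
      = List.replicate (zeropad - (pvLoopB i []).length).toNat '0' := by
    simp [List.map_const']
  simp only [hpad]
  rw [pvFold_eq0, pvIns_chunk]
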